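-- pv_equiv track=rewrite | github.com/cyphar/ncss | 2014/w2/q4complex.py | ambiguity_order
-- ===== SOURCE A (Python) =====
-- import itertools
--
-- MONTHS = {
-- 	1: 31,
-- 	2: 28,
-- 	3: 31,
-- 	4: 30,
-- 	5: 31,
-- 	6: 30,
-- 	7: 31,
-- 	8: 31,
-- 	9: 30,
-- 	10: 31,
-- 	11: 30,
-- 	12: 31,
-- }
--
-- DAY = 0
--
-- MONTH = 1
--
-- YEAR = 2
--
-- def is_month(part):
-- 	return 0 < part <= 12
--
-- def is_day(part, month):
-- 	return 12 < part <= MONTHS[month]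
--
-- def is_year(part, month):
-- 	return MONTHS[month] < part <= 9999
--
-- def brute_force_order(date):
-- 	for fmt in itertools.permutations([DAY, MONTH, YEAR], 3):
-- 		fmt = list(fmt)
--
-- 		day = date[fmt.index(DAY)]
-- 		month = date[fmt.index(MONTH)]
-- 		year = date[fmt.index(YEAR)]
--
-- 		if not is_month(month) or not is_day(day, month) or not is_year(year, month):
-- 			continue
--
-- 		return [fmt.index(DAY), fmt.index(MONTH), fmt.index(YEAR)]
--
-- 	return None
--
-- def ambiguity_order(dates):
-- 	for date in dates:
-- 		order = brute_force_order(date)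
--
-- 		if order:
-- 			break
-- 	else:
-- 		return None
--
-- 	fmt = {
-- 		"day": order[DAY],
-- 		"month": order[MONTH],
-- 		"year": order[YEAR],
-- 	}
--
-- 	return fmt
-- ===== SOURCE B (Python) =====
-- MONTH_DAYS = (31, 28, 31, 30, 31, 30, 31, 31, 30, 31, 30, 31)
--
--
-- def _classify(date):
--     # Direct range classification: the three ranges (1..12, 13..month_len, month_len+1..9999)
--     # are pairwise disjoint, so no permutation search is needed.
--     triple = (date[0], date[1], date[2])
--     month_pos = None
--     for i, v in enumerate(triple):
--         if 0 < v <= 12: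
--             month_pos = i
--             break
--     if month_pos is None:
--         return None
--     limit = MONTH_DAYS[triple[month_pos] - 1]
--     day_pos = None
--     year_pos = None
--     for i, v in enumerate(triple):
--         if i == month_pos:
--             continue
--         if 12 < v <= limit:
--             day_pos = i
--         elif limit < v <= 9999:
--             year_pos = i
--         else:
--             return None
--     if day_pos is None or year_pos is None:
--         return None
--     return {"day": day_pos, "month": month_pos, "year": year_pos}
--
--
-- def ambiguity_order(dates):
--     for date in dates:
--         fmt = _classify(date)
--         if fmt is not None:
--             return fmt
--     return None
-- ===== Notes on version B (the rewrite author's own statement) =====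
-- stated objective: simpler
-- what changed: Replaced the 6-permutation brute-force search per date with a single direct range classification: find the first value in 1..12 as the month, then classify the other two positions as day (13..month length) or year (month length+1..9999), which is exact because the three ranges are pairwise disjoint.
import Mathlib
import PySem

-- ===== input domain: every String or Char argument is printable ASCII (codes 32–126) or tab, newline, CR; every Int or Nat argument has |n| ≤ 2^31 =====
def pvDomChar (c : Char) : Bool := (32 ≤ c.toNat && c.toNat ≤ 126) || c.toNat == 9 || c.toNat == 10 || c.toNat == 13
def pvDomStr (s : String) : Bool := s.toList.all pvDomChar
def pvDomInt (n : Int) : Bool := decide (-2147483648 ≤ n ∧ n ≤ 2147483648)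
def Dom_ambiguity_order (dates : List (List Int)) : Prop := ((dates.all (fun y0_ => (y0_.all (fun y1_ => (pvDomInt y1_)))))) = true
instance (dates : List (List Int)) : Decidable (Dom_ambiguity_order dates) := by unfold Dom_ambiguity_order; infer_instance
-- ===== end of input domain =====

-- B replaces the 6-permutation brute force per date with a single direct range
-- classification (the three value ranges are pairwise disjoint); same results.

-- ===== PORT A =====
def MONTHS : PySem.Dict Int Int :=
  PySem.Dict.ofList [(1,31),(2,28),(3,31),(4,30),(5,31),(6,30),(7,31),(8,31),(9,30),(10,31),(11,30),(12,31)]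

def is_month (part : Int) : Bool := decide (0 < part ∧ part ≤ 12)

-- Python's MONTHS[month] is only evaluated when is_month month holds (the 'or' short-circuits),
-- where the key exists, so getD 0 is exact on every reached input.
def is_day (part month : Int) : Bool := decide (12 < part ∧ part ≤ MONTHS.getD month 0)

def is_year (part month : Int) : Bool := decide (MONTHS.getD month 0 < part ∧ part ≤ 9999)

-- itertools.permutations([0,1,2], 3), in Python's order
def permutations012 : List (List Int) := [[0,1,2],[0,2,1],[1,0,2],[1,2,0],[2,0,1],[2,1,0]]

-- one iteration of brute_force_order's loop: none = IndexError, some none = continue, some (some r) = return r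
def bfoStep (date : List Int) (fmt : List Int) : Option (Option (List Int)) :=
  match PySem.List.index? fmt 0, PySem.List.index? fmt 1, PySem.List.index? fmt 2 with
  | some di, some mi, some yi =>
    match PySem.List.pyGet? date (di : Int), PySem.List.pyGet? date (mi : Int), PySem.List.pyGet? date (yi : Int) with
    | some day, some month, some year =>
      if !is_month month || !is_day day month || !is_year year month then some none
      else some (some [(di : Int), (mi : Int), (yi : Int)])
    | _, _, _ => none
  | _, _, _ => none   -- unreachable: 0,1,2 occur in every fmt

def bfoLoop (date : List Int) : List (List Int) → Option (Option (List Int))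
  | [] => some none            -- loop ends: return None
  | fmt :: rest =>
    match bfoStep date fmt with
    | none => none
    | some (some r) => some (some r)
    | some none => bfoLoop date rest

def brute_force_order (date : List Int) : Option (Option (List Int)) :=
  bfoLoop date permutations012

def ambiguity_order : List (List Int) → Option (List (String × Int))
  | [] => none                 -- for-else: return None
  | date :: rest =>
    match brute_force_order date with
    | none => none             -- IndexError propagates (outside Pre_)
    | some none => ambiguity_order rest
    | some (some order) =>
      -- order always has 3 elements, so getD 0 is exact
      some [("day", (PySem.List.pyGet? order 0).getD 0),
            ("month", (PySem.List.pyGet? order 1).getD 0),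
            ("year", (PySem.List.pyGet? order 2).getD 0)]

-- ===== PORT B =====
def MONTH_DAYS : List Int := [31, 28, 31, 30, 31, 30, 31, 31, 30, 31, 30, 31]

-- first loop of _classify: first index whose value is in 1..12
def findMonth : List (Int × Int) → Option Int
  | [] => none
  | (i, v) :: rest => if 0 < v ∧ v ≤ 12 then some i else findMonth rest

-- second loop of _classify, state = (day_pos, year_pos); none = 'return None'
def classifyLoop (mp L : Int) : List (Int × Int) → Option Int × Option Int → Option (Option Int × Option Int)
  | [], st => some st
  | (i, v) :: rest, (dp, yp) =>
    if i = mp then classifyLoop mp L rest (dp, yp)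
    else if 12 < v ∧ v ≤ L then classifyLoop mp L rest (some i, yp)
    else if L < v ∧ v ≤ 9999 then classifyLoop mp L rest (dp, some i)
    else none

-- _classify: none = IndexError, some none = returns None, some (some fmt) = returns fmt
def classify (date : List Int) : Option (Option (List (String × Int))) :=
  match PySem.List.pyGet? date 0, PySem.List.pyGet? date 1, PySem.List.pyGet? date 2 with
  | some a, some b, some c =>
    let triple : List (Int × Int) := [(0, a), (1, b), (2, c)]   -- enumerate(triple)
    match findMonth triple with
    | none => some none
    | some mp =>
      -- mp ∈ {0,1,2} and triple[mp] ∈ 1..12, so both getD 0 are exact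
      let mv := (PySem.List.pyGet? [a, b, c] mp).getD 0
      let limit := (PySem.List.pyGet? MONTH_DAYS (mv - 1)).getD 0
      match classifyLoop mp limit triple (none, none) with
      | none => some none
      | some (some dp, some yp) => some (some [("day", dp), ("month", mp), ("year", yp)])
      | some _ => some none
  | _, _, _ => none   -- IndexError on dates shorter than 3 (outside Pre_)

def ambiguity_order_alt : List (List Int) → Option (List (String × Int))
  | [] => none
  | date :: rest =>
    match classify date with
    | none => none             -- IndexError propagates (outside Pre_)
    | some none => ambiguity_order_alt rest
    | some (some fmt) => some fmt

-- ===== PRECONDITION & SPEC =====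
-- a date that brute_force_order / _classify accepts: length ≥ 3 and a clean day/month/year split
def pvLimit (m : Int) : Int :=
  (PySem.List.pyGet? [31, 28, 31, 30, 31, 30, 31, 31, 30, 31, 30, 31] (m - 1)).getD 0

def pvGoodAs (m d y : Int) : Bool :=
  decide (0 < m ∧ m ≤ 12 ∧ ((12 < d ∧ d ≤ pvLimit m ∧ pvLimit m < y ∧ y ≤ 9999)))

def pvGoodTriple (a b c : Int) : Bool :=
  pvGoodAs a b c || pvGoodAs a c b || pvGoodAs b a c || pvGoodAs b c a || pvGoodAs c a b || pvGoodAs c b a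

def pvGoodDate (d : List Int) : Bool :=
  decide (3 ≤ d.length) && pvGoodTriple (d.getD 0 0) (d.getD 1 0) (d.getD 2 0)

-- Pre_ excludes exactly the inputs where Python raises IndexError: a date shorter
-- than 3 entries that is scanned before any date matches a day/month/year split.
def Pre_ambiguity_order (dates : List (List Int)) : Prop :=
  ∀ i, i < dates.length → (∀ j, j < i → pvGoodDate (dates.getD j []) = false) →
    3 ≤ (dates.getD i []).length

instance (dates : List (List Int)) : Decidable (Pre_ambiguity_order dates) := by
  unfold Pre_ambiguity_order; infer_instance

def pvWitness_ambiguity_order : List (List Int) := [[5, 20, 2000], [1]]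

def Spec_ambiguity_order (dates : List (List Int)) (out : Option (List (String × Int))) : Prop := out = ambiguity_order_alt dates
instance (dates : List (List Int)) (out : Option (List (String × Int))) : Decidable (Spec_ambiguity_order dates out) := by unfold Spec_ambiguity_order; infer_instance

-- ===== CLAIM (what is proved, stated in full; the proofs are below) =====
def Claim_equal_ambiguity_order : Prop := ∀ (dates : List (List Int)), Dom_ambiguity_order dates → Pre_ambiguity_order dates → Spec_ambiguity_order dates (ambiguity_order dates)

-- ===== LEMMAS AND PROOFS =====

theorem pg0 (a : Int) (rest : List Int) : PySem.List.pyGet? (a::rest) 0 = some a := by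
  simp [PySem.List.pyGet?, PySem.List.pyIdx?]
theorem pg1 (a b : Int) (rest : List Int) : PySem.List.pyGet? (a::b::rest) 1 = some b := by
  simp [PySem.List.pyGet?, PySem.List.pyIdx?]
  try rw [if_pos (by omega)]
  try simp
theorem pg2 (a b c : Int) (rest : List Int) : PySem.List.pyGet? (a::b::c::rest) 2 = some c := by
  simp [PySem.List.pyGet?, PySem.List.pyIdx?]
  try rw [if_pos (by omega)]
  try simp

theorem limit_eq (m : Int) (h1 : 0 < m) (h2 : m ≤ 12) :
    (PySem.List.pyGet? MONTH_DAYS (m - 1)).getD 0 = MONTHS.getD m 0 := by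
  interval_cases m <;> decide

theorem limit_bounds (m : Int) (h1 : 0 < m) (h2 : m ≤ 12) :
    28 ≤ MONTHS.getD m 0 ∧ MONTHS.getD m 0 ≤ 31 := by
  interval_cases m <;> decide



theorem idx_012_0 : PySem.List.index? ([0,1,2] : List Int) 0 = some 0 := by decide
theorem idx_012_1 : PySem.List.index? ([0,1,2] : List Int) 1 = some 1 := by decide
theorem idx_012_2 : PySem.List.index? ([0,1,2] : List Int) 2 = some 2 := by decide
theorem idx_021_0 : PySem.List.index? ([0,2,1] : List Int) 0 = some 0 := by decide
theorem idx_021_1 : PySem.List.index? ([0,2,1] : List Int) 1 = some 2 := by decide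
theorem idx_021_2 : PySem.List.index? ([0,2,1] : List Int) 2 = some 1 := by decide
theorem idx_102_0 : PySem.List.index? ([1,0,2] : List Int) 0 = some 1 := by decide
theorem idx_102_1 : PySem.List.index? ([1,0,2] : List Int) 1 = some 0 := by decide
theorem idx_102_2 : PySem.List.index? ([1,0,2] : List Int) 2 = some 2 := by decide
theorem idx_120_0 : PySem.List.index? ([1,2,0] : List Int) 0 = some 2 := by decide
theorem idx_120_1 : PySem.List.index? ([1,2,0] : List Int) 1 = some 0 := by decide
theorem idx_120_2 : PySem.List.index? ([1,2,0] : List Int) 2 = some 1 := by decide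
theorem idx_201_0 : PySem.List.index? ([2,0,1] : List Int) 0 = some 1 := by decide
theorem idx_201_1 : PySem.List.index? ([2,0,1] : List Int) 1 = some 2 := by decide
theorem idx_201_2 : PySem.List.index? ([2,0,1] : List Int) 2 = some 0 := by decide
theorem idx_210_0 : PySem.List.index? ([2,1,0] : List Int) 0 = some 2 := by decide
theorem idx_210_1 : PySem.List.index? ([2,1,0] : List Int) 1 = some 1 := by decide
theorem idx_210_2 : PySem.List.index? ([2,1,0] : List Int) 2 = some 0 := by decide

theorem classify_cons (a b c : Int) (rest : List Int) :
    classify (a :: b :: c :: rest) =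
      Option.map (Option.map (fun order =>
        [("day", (PySem.List.pyGet? order 0).getD 0),
         ("month", (PySem.List.pyGet? order 1).getD 0),
         ("year", (PySem.List.pyGet? order 2).getD 0)]))
        (brute_force_order (a :: b :: c :: rest)) := by
  simp only [classify, brute_force_order, permutations012, bfoLoop, bfoStep, findMonth,
    classifyLoop, pg0, pg1, pg2, is_month, is_day, is_year, idx_012_0, idx_012_1, idx_012_2, idx_021_0, idx_021_1, idx_021_2, idx_102_0, idx_102_1, idx_102_2, idx_120_0, idx_120_1, idx_120_2, idx_201_0, idx_201_1, idx_201_2, idx_210_0, idx_210_1, idx_210_2,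
    Nat.cast_ofNat, Nat.cast_zero, Nat.cast_one, Option.getD_some,
    Bool.or_eq_true, Bool.not_eq_true', decide_eq_false_iff_not, decide_eq_true_eq]
  by_cases Ma : 0 < a ∧ a ≤ 12
  all_goals by_cases Mb : 0 < b ∧ b ≤ 12
  all_goals by_cases Mc : 0 < c ∧ c ≤ 12
  · simp [Ma, Mb, Mc, pg0, pg1, pg2]
    rw [limit_eq a Ma.1 Ma.2]
    obtain ⟨hLa1, hLa2⟩ := limit_bounds a Ma.1 Ma.2
    obtain ⟨hLb1, hLb2⟩ := limit_bounds b Mb.1 Mb.2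
    obtain ⟨hLc1, hLc2⟩ := limit_bounds c Mc.1 Mc.2
    generalize MONTHS.getD a 0 = La at *
    generalize MONTHS.getD b 0 = Lb at *
    generalize MONTHS.getD c 0 = Lc at *
    split_ifs <;> first | rfl | omega | (simp [PySem.List.pyGet?, PySem.List.pyIdx?]; try omega)
  · simp [Ma, Mb, Mc, pg0, pg1, pg2]
    rw [limit_eq a Ma.1 Ma.2]
    obtain ⟨hLa1, hLa2⟩ := limit_bounds a Ma.1 Ma.2
    obtain ⟨hLb1, hLb2⟩ := limit_bounds b Mb.1 Mb.2
    generalize MONTHS.getD a 0 = La at *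
    generalize MONTHS.getD b 0 = Lb at *
    split_ifs <;> first | rfl | omega | (simp [PySem.List.pyGet?, PySem.List.pyIdx?]; try omega)
  · simp [Ma, Mb, Mc, pg0, pg1, pg2]
    rw [limit_eq a Ma.1 Ma.2]
    obtain ⟨hLa1, hLa2⟩ := limit_bounds a Ma.1 Ma.2
    obtain ⟨hLc1, hLc2⟩ := limit_bounds c Mc.1 Mc.2
    generalize MONTHS.getD a 0 = La at *
    generalize MONTHS.getD c 0 = Lc at *
    split_ifs <;> first | rfl | omega | (simp [PySem.List.pyGet?, PySem.List.pyIdx?]; try omega)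
  · simp [Ma, Mb, Mc, pg0, pg1, pg2]
    rw [limit_eq a Ma.1 Ma.2]
    obtain ⟨hLa1, hLa2⟩ := limit_bounds a Ma.1 Ma.2
    generalize MONTHS.getD a 0 = La at *
    split_ifs <;> first | rfl | omega | (simp [PySem.List.pyGet?, PySem.List.pyIdx?]; try omega)
  · simp [Ma, Mb, Mc, pg0, pg1, pg2]
    rw [limit_eq b Mb.1 Mb.2]
    obtain ⟨hLb1, hLb2⟩ := limit_bounds b Mb.1 Mb.2
    obtain ⟨hLc1, hLc2⟩ := limit_bounds c Mc.1 Mc.2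
    generalize MONTHS.getD b 0 = Lb at *
    generalize MONTHS.getD c 0 = Lc at *
    split_ifs <;> first | rfl | omega | (simp [PySem.List.pyGet?, PySem.List.pyIdx?]; try omega)
  · simp [Ma, Mb, Mc, pg0, pg1, pg2]
    rw [limit_eq b Mb.1 Mb.2]
    obtain ⟨hLb1, hLb2⟩ := limit_bounds b Mb.1 Mb.2
    generalize MONTHS.getD b 0 = Lb at *
    split_ifs <;> first | rfl | omega | (simp [PySem.List.pyGet?, PySem.List.pyIdx?]; try omega)
  · simp [Ma, Mb, Mc, pg0, pg1, pg2]
    rw [limit_eq c Mc.1 Mc.2]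
    obtain ⟨hLc1, hLc2⟩ := limit_bounds c Mc.1 Mc.2
    generalize MONTHS.getD c 0 = Lc at *
    split_ifs <;> first | rfl | omega | (simp [PySem.List.pyGet?, PySem.List.pyIdx?]; try omega)
  · simp [Ma, Mb, Mc, pg0, pg1, pg2]

theorem idxo_012_0 : List.idxOf? (0 : Int) [0,1,2] = some 0 := by decide
theorem idxo_012_1 : List.idxOf? (1 : Int) [0,1,2] = some 1 := by decide
theorem idxo_012_2 : List.idxOf? (2 : Int) [0,1,2] = some 2 := by decide
theorem idxo_021_0 : List.idxOf? (0 : Int) [0,2,1] = some 0 := by decide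
theorem idxo_021_1 : List.idxOf? (1 : Int) [0,2,1] = some 2 := by decide
theorem idxo_021_2 : List.idxOf? (2 : Int) [0,2,1] = some 1 := by decide
theorem idxo_102_0 : List.idxOf? (0 : Int) [1,0,2] = some 1 := by decide
theorem idxo_102_1 : List.idxOf? (1 : Int) [1,0,2] = some 0 := by decide
theorem idxo_102_2 : List.idxOf? (2 : Int) [1,0,2] = some 2 := by decide
theorem idxo_120_0 : List.idxOf? (0 : Int) [1,2,0] = some 2 := by decide
theorem idxo_120_1 : List.idxOf? (1 : Int) [1,2,0] = some 0 := by decide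
theorem idxo_120_2 : List.idxOf? (2 : Int) [1,2,0] = some 1 := by decide
theorem idxo_201_0 : List.idxOf? (0 : Int) [2,0,1] = some 1 := by decide
theorem idxo_201_1 : List.idxOf? (1 : Int) [2,0,1] = some 2 := by decide
theorem idxo_201_2 : List.idxOf? (2 : Int) [2,0,1] = some 0 := by decide
theorem idxo_210_0 : List.idxOf? (0 : Int) [2,1,0] = some 2 := by decide
theorem idxo_210_1 : List.idxOf? (1 : Int) [2,1,0] = some 1 := by decide
theorem idxo_210_2 : List.idxOf? (2 : Int) [2,1,0] = some 0 := by decide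

theorem classify_eq_bfo (date : List Int) :
    classify date =
      Option.map (Option.map (fun order =>
        [("day", (PySem.List.pyGet? order 0).getD 0),
         ("month", (PySem.List.pyGet? order 1).getD 0),
         ("year", (PySem.List.pyGet? order 2).getD 0)]))
        (brute_force_order date) := by
  match date with
  | [] => decide
  | [a] =>
    simp [classify, brute_force_order, permutations012, bfoLoop, bfoStep,
      PySem.List.pyGet?, PySem.List.pyIdx?, idxo_012_0, idxo_012_1, idxo_012_2, idxo_021_0, idxo_021_1, idxo_021_2, idxo_102_0, idxo_102_1, idxo_102_2, idxo_120_0, idxo_120_1, idxo_120_2, idxo_201_0, idxo_201_1, idxo_201_2, idxo_210_0, idxo_210_1, idxo_210_2]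
  | [a, b] =>
    simp [classify, brute_force_order, permutations012, bfoLoop, bfoStep,
      PySem.List.pyGet?, PySem.List.pyIdx?, idxo_012_0, idxo_012_1, idxo_012_2, idxo_021_0, idxo_021_1, idxo_021_2, idxo_102_0, idxo_102_1, idxo_102_2, idxo_120_0, idxo_120_1, idxo_120_2, idxo_201_0, idxo_201_1, idxo_201_2, idxo_210_0, idxo_210_1, idxo_210_2]
  | a :: b :: c :: rest => exact classify_cons a b c rest

theorem ports_eq (dates : List (List Int)) : ambiguity_order dates = ambiguity_order_alt dates := by
  induction dates with
  | nil => rfl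
  | cons d rest ih =>
    simp only [ambiguity_order, ambiguity_order_alt, classify_eq_bfo d]
    cases hb : brute_force_order d with
    | none => rfl
    | some o =>
      cases o with
      | none => simpa using ih
      | some r => simp

-- ===== VERDICT (by name: the statement is the Claim_ definition above) =====
theorem ambiguity_order_spec : Claim_equal_ambiguity_order := by
  intro dates _ _
  unfold Spec_ambiguity_order
  exact ports_eq dates
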